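-- pv_equiv track=rewrite | github.com/ward-segers/courses | MT2/Semester1/Classic Computer Science Algorithms/dodona/snake.py | laatst_levende_positie
-- ===== SOURCE A (Python) =====
-- def beweeg(coordinaten, pijltje):
--     x, y = coordinaten
--     if pijltje == '>':
--         return (x + 1, y)
--     elif pijltje == '<':
--         return (x - 1, y)
--     elif pijltje == '^':
--         return (x, y + 1)
--     elif pijltje == 'v':
--         return (x, y - 1)
--
-- def teruggekeerd(pijltjes):
--     # Controleer of de combinatie van pijltjes tegengesteld is
--     return (pijltjes == ['>', '<']) or (pijltjes == ['<', '>']) or \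
--            (pijltjes == ['^', 'v']) or (pijltjes == ['v', '^'])
--
-- def laatst_levende_positie(pijltjes):
--     x, y = 0, 0  # Begincoördinaten
--     geldige_zetten = 0
--
--     for i in range(len(pijltjes) - 1):
--         # Controleer of de volgende stap dodelijk is
--         if teruggekeerd([pijltjes[i], pijltjes[i + 1]]):
--             break  # Stoppen als een dodelijke combinatie gevonden wordt
--         else:
--             geldige_zetten += 1
--             x, y = beweeg((x, y), pijltjes[i])
--
--     # Verplaats de slang één keer extra als er geen dodelijke combinatie is gevonden
--     x, y = beweeg((x, y), pijltjes[geldige_zetten])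
--     return geldige_zetten + 1, x, y
-- ===== SOURCE B (Python) =====
-- OPP = {'>': '<', '<': '>', '^': 'v', 'v': '^'}
-- DELTA = {'>': (1, 0), '<': (-1, 0), '^': (0, 1), 'v': (0, -1)}
--
-- def death_index(pijltjes):
--     # smallest i with an opposing adjacent pair, else len(pijltjes) - 1
--     n = len(pijltjes)
--     return next((i for i in range(n - 1)
--                  if OPP.get(pijltjes[i]) == pijltjes[i + 1]), n - 1)
--
-- def laatst_levende_positie(pijltjes):
--     m = death_index(pijltjes)
--     x = sum(DELTA[p][0] for p in pijltjes[:m + 1])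
--     y = sum(DELTA[p][1] for p in pijltjes[:m + 1])
--     return m + 1, x, y
-- ===== Notes on version B (the rewrite author's own statement) =====
-- stated objective: alternative
-- what changed: Replaces A's single stateful simulation loop (position + move counter mutated with a break) by a two-phase decomposition: first find the death index with next() over adjacent pairs, then compute the final position as delta-table sums over the prefix slice.
import Mathlib
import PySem

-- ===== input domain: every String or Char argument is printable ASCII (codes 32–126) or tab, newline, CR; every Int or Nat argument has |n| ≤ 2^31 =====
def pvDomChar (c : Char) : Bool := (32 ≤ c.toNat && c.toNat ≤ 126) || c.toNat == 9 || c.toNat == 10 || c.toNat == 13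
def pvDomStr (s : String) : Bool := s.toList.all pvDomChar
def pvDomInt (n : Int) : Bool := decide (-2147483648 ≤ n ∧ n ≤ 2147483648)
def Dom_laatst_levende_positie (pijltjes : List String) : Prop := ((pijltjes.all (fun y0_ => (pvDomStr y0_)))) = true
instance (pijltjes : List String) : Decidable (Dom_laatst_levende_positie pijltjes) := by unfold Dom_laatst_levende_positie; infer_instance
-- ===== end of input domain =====

-- B re-implements A by a two-phase decomposition (find the death index, then sum a
-- direction-delta table over the prefix) instead of A's single stateful simulation loop;
-- equivalence is proved on Pre_ (exactly the inputs where the Python A returns normally).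

-- ===== PORT A =====
-- beweeg: falls through (Python returns None) on an unknown arrow; the caller's
-- 'x, y = None' then raises TypeError, modelled as 'none' threaded through coreA.
def beweeg (coordinaten : Int × Int) (pijltje : String) : Option (Int × Int) :=
  if pijltje = ">" then some (coordinaten.1 + 1, coordinaten.2)
  else if pijltje = "<" then some (coordinaten.1 - 1, coordinaten.2)
  else if pijltje = "^" then some (coordinaten.1, coordinaten.2 + 1)
  else if pijltje = "v" then some (coordinaten.1, coordinaten.2 - 1)
  else none

def teruggekeerd (pijltjes : List String) : Bool :=
  (pijltjes == [">", "<"]) || (pijltjes == ["<", ">"]) ||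
  (pijltjes == ["^", "v"]) || (pijltjes == ["v", "^"])

-- A's for-loop over i in range(len-1): the obvious structural recursion over the same
-- state (x, y, geldige_zetten); pijltjes[i], pijltjes[i+1] are the two heads of the rest.
-- 'none' = the TypeError raised when beweeg returns None.
def loopA (x y g : Int) : List String → Option (Int × Int × Int)
  | a :: b :: rest =>
      if teruggekeerd [a, b] then some (x, y, g)          -- break
      else
        match beweeg (x, y) a with
        | none => none
        | some (x', y') => loopA x' y' (g + 1) (b :: rest)
  | _ => some (x, y, g)

-- after the loop: x, y = beweeg((x, y), pijltjes[geldige_zetten]); 'none' = IndexError/TypeError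
def coreA (pijltjes : List String) : Option (Int × Int × Int) :=
  match loopA 0 0 0 pijltjes with
  | none => none
  | some (x, y, g) =>
      match PySem.List.pyGet? pijltjes g with
      | none => none
      | some p =>
          match beweeg (x, y) p with
          | none => none
          | some (x', y') => some (g + 1, x', y')

-- none (an exception in the Python) only occurs outside Pre_; the default is never claimed about.
def laatst_levende_positie (pijltjes : List String) : Int × Int × Int :=
  (coreA pijltjes).getD (0, 0, 0)

-- ===== PORT B =====
-- OPP.get(p): None for a string that is not an arrow
def oppGet (p : String) : Option String :=
  if p = ">" then some "<" else if p = "<" then some ">"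
  else if p = "^" then some "v" else if p = "v" then some "^" else none

-- DELTA[p]: none = KeyError for a string that is not an arrow
def delta? (p : String) : Option (Int × Int) :=
  if p = ">" then some (1, 0) else if p = "<" then some (-1, 0)
  else if p = "^" then some (0, 1) else if p = "v" then some (0, -1) else none

-- next((i for i in range(n-1) if OPP.get(pijltjes[i]) == pijltjes[i+1]), n-1):
-- structural scan over adjacent pairs carrying the running index i
def findDeath (i : Nat) : List String → Option Nat
  | a :: b :: rest => if oppGet a = some b then some i else findDeath (i + 1) (b :: rest)
  | _ => none

def death_index (pijltjes : List String) : Int :=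
  match findDeath 0 pijltjes with
  | some i => (i : Int)
  | none => (pijltjes.length : Int) - 1

-- sum(DELTA[p][0] ...), sum(DELTA[p][1] ...) over the same prefix; none = KeyError
def sumDeltas : List String → Option (Int × Int)
  | [] => some (0, 0)
  | p :: rest =>
      match delta? p, sumDeltas rest with
      | some d, some s => some (d.1 + s.1, d.2 + s.2)
      | _, _ => none

-- pijltjes[:m+1]: m+1 ≥ 0 always (m ≥ -1), so the slice is 'take (m+1)'
def coreB (pijltjes : List String) : Option (Int × Int × Int) :=
  let m := death_index pijltjes
  match sumDeltas (pijltjes.take (m + 1).toNat) with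
  | none => none
  | some (x, y) => some (m + 1, x, y)

def laatst_levende_positie_alt (pijltjes : List String) : Int × Int × Int :=
  (coreB pijltjes).getD (0, 0, 0)

-- ===== PRECONDITION & SPEC =====
def isArrow (s : String) : Bool := s = ">" || s = "<" || s = "^" || s = "v"
def isOpp (a b : String) : Bool :=
  (a = ">" && b = "<") || (a = "<" && b = ">") || (a = "^" && b = "v") || (a = "v" && b = "^")

-- Exactly the inputs where the Python A returns normally: the list is nonempty and every
-- arrow the simulation actually reads (index i with no opposing adjacent pair strictly
-- before i) is one of > < ^ v; otherwise A raises IndexError or TypeError.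
def Pre_laatst_levende_positie (pijltjes : List String) : Prop :=
  pijltjes ≠ [] ∧
  ∀ i, i < pijltjes.length →
    (∀ j, j < i → isOpp (pijltjes.getD j "") (pijltjes.getD (j + 1) "") = false) →
    isArrow (pijltjes.getD i "") = true

instance (pijltjes : List String) : Decidable (Pre_laatst_levende_positie pijltjes) := by
  unfold Pre_laatst_levende_positie; infer_instance

def pvWitness_laatst_levende_positie : List String := [">", ">", "^", "<", ">"]

def Spec_laatst_levende_positie (pijltjes : List String) (out : Int × Int × Int) : Prop :=
  out = laatst_levende_positie_alt pijltjes
instance (pijltjes : List String) (out : Int × Int × Int) :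
    Decidable (Spec_laatst_levende_positie pijltjes out) := by
  unfold Spec_laatst_levende_positie; infer_instance

-- ===== CLAIM (what is proved, stated in full; the proofs are below) =====
def Claim_equal_laatst_levende_positie : Prop :=
  ∀ (pijltjes : List String), Dom_laatst_levende_positie pijltjes →
    Pre_laatst_levende_positie pijltjes →
    Spec_laatst_levende_positie pijltjes (laatst_levende_positie pijltjes)

-- ===== LEMMAS AND PROOFS =====

-- structural "valid prefix": every arrow read before (and at) the death point is valid
def VP : List String → Prop
  | [] => True
  | [a] => isArrow a = true
  | a :: b :: rest => isArrow a = true ∧ (isOpp a b = true ∨ VP (b :: rest))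

-- A's whole pipeline as one structural recursion (loop fused with the final move)
def pipeA (x y g : Int) : List String → Option (Int × Int × Int)
  | [] => none
  | [a] =>
      match beweeg (x, y) a with
      | none => none
      | some (x', y') => some (g + 1, x', y')
  | a :: b :: rest =>
      if teruggekeerd [a, b] then
        match beweeg (x, y) a with
        | none => none
        | some (x', y') => some (g + 1, x', y')
      else
        match beweeg (x, y) a with
        | none => none
        | some (x', y') => pipeA x' y' (g + 1) (b :: rest)

theorem terug_eq_isOpp (a b : String) : teruggekeerd [a, b] = isOpp a b := by
  simp [teruggekeerd, isOpp, beq_eq_decide]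

theorem beweeg_eq_delta (x y : Int) (p : String) :
    beweeg (x, y) p = (delta? p).map (fun d => (x + d.1, y + d.2)) := by
  unfold beweeg delta?
  split_ifs <;> simp [sub_eq_add_neg]

theorem findDeath_shift (l : List String) (i : Nat) :
    findDeath i l = (findDeath 0 l).map (· + i) := by
  induction l generalizing i with
  | nil => simp [findDeath]
  | cons a rest ih =>
    match rest with
    | [] => simp [findDeath]
    | b :: rest' =>
      by_cases h : oppGet a = some b
      · simp [findDeath, h]
      · rw [show findDeath i (a :: b :: rest') = findDeath (i + 1) (b :: rest') from by
            simp [findDeath, h],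
          show findDeath 0 (a :: b :: rest') = findDeath (0 + 1) (b :: rest') from by
            simp [findDeath, h]]
        rw [ih (i + 1), ih (0 + 1)]
        cases findDeath 0 (b :: rest') <;> simp <;> omega

theorem oppGet_eq (a b : String) : (oppGet a = some b) ↔ isOpp a b = true := by
  unfold oppGet isOpp
  split_ifs <;> simp_all [eq_comm]

theorem death_cons (a b : String) (rest : List String) :
    death_index (a :: b :: rest) =
      if isOpp a b then 0 else death_index (b :: rest) + 1 := by
  by_cases h : isOpp a b = true
  · simp [death_index, findDeath, oppGet_eq, h]
  · have h' : ¬ (oppGet a = some b) := by rw [oppGet_eq]; simp [h]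
    unfold death_index
    rw [show findDeath 0 (a :: b :: rest) = findDeath 1 (b :: rest) from by
          simp [findDeath, h']]
    rw [findDeath_shift]
    cases hd : findDeath 0 (b :: rest) with
    | none => simp [h]
    | some i => simp [h]

theorem death_nonneg (l : List String) (hl : l ≠ []) : 0 ≤ death_index l := by
  unfold death_index
  cases hd : findDeath 0 l with
  | none =>
    simp only []
    have : 1 ≤ l.length := List.length_pos_iff.mpr hl
    omega
  | some i => simp

theorem delta_of_arrow (p : String) (h : isArrow p = true) : ∃ d, delta? p = some d := by
  unfold isArrow at h
  unfold delta?
  split_ifs <;> simp_all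

-- main induction: under VP, A's fused pipeline equals B's death-index + prefix-sum form
theorem pipeA_eq (l : List String) (x y g : Int) (hl : l ≠ []) (hv : VP l) :
    ∃ s, sumDeltas (l.take ((death_index l).toNat + 1)) = some s ∧
      pipeA x y g l = some (g + death_index l + 1, x + s.1, y + s.2) := by
  induction l generalizing x y g with
  | nil => exact absurd rfl hl
  | cons a rest ih =>
    match rest with
    | [] =>
      have ha : isArrow a = true := hv
      obtain ⟨d, hd⟩ := delta_of_arrow a ha
      refine ⟨(d.1 + 0, d.2 + 0), ?_, ?_⟩
      · simp [death_index, findDeath, sumDeltas, hd]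
      · simp [pipeA, beweeg_eq_delta, hd, death_index, findDeath]
    | b :: rest' =>
      obtain ⟨ha, hrest⟩ := hv
      obtain ⟨d, hd⟩ := delta_of_arrow a ha
      by_cases hop : isOpp a b = true
      · -- death at index 0: prefix is [a]
        refine ⟨(d.1 + 0, d.2 + 0), ?_, ?_⟩
        · simp [death_cons, hop, sumDeltas, hd]
        · simp [pipeA, terug_eq_isOpp, hop, beweeg_eq_delta, hd, death_cons]
      · have hvrest : VP (b :: rest') := by
          cases hrest with
          | inl h => exact absurd h hop
          | inr h => exact h
        obtain ⟨s, hs, hp⟩ := ih (x := x + d.1) (y := y + d.2) (g := g + 1)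
          (by simp) hvrest
        have hm : 0 ≤ death_index (b :: rest') := death_nonneg _ (by simp)
        refine ⟨(d.1 + s.1, d.2 + s.2), ?_, ?_⟩
        · have hop' : isOpp a b = false := by simp [hop]
          rw [death_cons, hop']
          simp only [Bool.false_eq_true, if_false]
          have : ((death_index (b :: rest') + 1).toNat + 1) =
              ((death_index (b :: rest')).toNat + 1) + 1 := by omega
          rw [this, List.take_succ_cons]
          show (match delta? a,
                  sumDeltas (List.take ((death_index (b :: rest')).toNat + 1) (b :: rest')) with
                | some d, some s => some (d.1 + s.1, d.2 + s.2)
                | _, _ => none) = _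
          rw [hd, hs]
        · rw [show pipeA x y g (a :: b :: rest') =
              pipeA (x + d.1) (y + d.2) (g + 1) (b :: rest') from by
            simp [pipeA, terug_eq_isOpp, hop, beweeg_eq_delta, hd]]
          have hop' : isOpp a b = false := by simp [hop]
          rw [hp, death_cons, hop']
          simp only [Bool.false_eq_true, if_false, Option.some.injEq, Prod.mk.injEq]
          refine ⟨by ring, by ring, by ring⟩

-- coreA equals the fused pipeline: the final pijltjes[g] is the head of the unconsumed rest
theorem coreA_pipe (ps : List String) :
    ∀ (l : List String) (k : Nat) (x y : Int), l = ps.drop k →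
    (match loopA x y (k : Int) l with
     | none => none
     | some (x', y', g) =>
        match PySem.List.pyGet? ps g with
        | none => none
        | some p =>
          match beweeg (x', y') p with
          | none => none
          | some (x'', y'') => some (g + 1, x'', y'')) = pipeA x y (k : Int) l := by
  intro l
  induction l with
  | nil =>
    intro k x y hk
    have hlen : ps.length ≤ k := by
      have := congrArg List.length hk
      simp [List.length_drop] at this
      omega
    simp [loopA, pipeA, PySem.List.pyGet?_natCast, List.getElem?_eq_none hlen]
  | cons a rest ih =>
    intro k x y hk
    have hget : ps[k]? = some a := by
      have : (ps.drop k).head? = some a := by rw [← hk]; rfl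
      rwa [List.head?_drop] at this
    match rest with
    | [] =>
      simp [loopA, pipeA, PySem.List.pyGet?_natCast, hget]
    | b :: rest' =>
      by_cases hT : teruggekeerd [a, b] = true
      · simp [loopA, pipeA, hT, PySem.List.pyGet?_natCast, hget]
      · have hdrop : b :: rest' = ps.drop (k + 1) := by
          have := congrArg (List.drop 1) hk
          simpa [List.drop_drop, Nat.add_comm 1 k] using this
        have := ih (k + 1) (x := x) (y := y) hdrop
        cases hb : beweeg (x, y) a with
        | none => simp [loopA, pipeA, hT, hb]
        | some xy =>
          have h2 := ih (k + 1) (x := xy.1) (y := xy.2) hdrop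
          rw [show loopA x y (k : Int) (a :: b :: rest') =
                loopA xy.1 xy.2 ((k : Int) + 1) (b :: rest') from by
              simp [loopA, hT, hb],
            show pipeA x y (k : Int) (a :: b :: rest') =
                pipeA xy.1 xy.2 ((k : Int) + 1) (b :: rest') from by
              simp [pipeA, hT, hb]]
          rw [show ((k : Int) + 1) = ((k + 1 : Nat) : Int) from by push_cast; ring]
          exact h2

-- Pre_'s index form implies the structural valid-prefix property
theorem pre_vp (l : List String)
    (h : ∀ i, i < l.length →
      (∀ j, j < i → isOpp (l.getD j "") (l.getD (j + 1) "") = false) →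
      isArrow (l.getD i "") = true) : VP l := by
  induction l with
  | nil => trivial
  | cons a rest ih =>
    match rest with
    | [] =>
      have := h 0 (by simp) (by omega)
      simpa using this
    | b :: rest' =>
      have ha : isArrow a = true := by
        have := h 0 (by simp) (by omega)
        simpa using this
      refine ⟨ha, ?_⟩
      by_cases hop : isOpp a b = true
      · exact Or.inl hop
      · refine Or.inr (ih ?_)
        intro i hi hno
        have := h (i + 1) (by simpa using Nat.succ_lt_succ hi) ?_
        · simpa using this
        · intro j hj
          match j with
          | 0 => simpa using hop
          | j' + 1 =>
            have := hno j' (by omega)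
            simpa using this

-- ===== VERDICT (by name: the statement is the Claim_ definition above) =====
theorem laatst_levende_positie_spec : Claim_equal_laatst_levende_positie := by
  intro ps _ hpre
  obtain ⟨hne, hidx⟩ := hpre
  have hvp : VP ps := pre_vp ps hidx
  obtain ⟨s, hs, hp⟩ := pipeA_eq ps 0 0 0 hne hvp
  have hcore : coreA ps = pipeA 0 0 0 ps := by
    have := coreA_pipe ps ps 0 0 0 (by simp)
    simpa [coreA] using this
  have hm : 0 ≤ death_index ps := death_nonneg ps hne
  have hB : coreB ps = some (death_index ps + 1, s.1, s.2) := by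
    show (match sumDeltas (ps.take ((death_index ps + 1).toNat)) with
          | none => none
          | some (x, y) => some (death_index ps + 1, x, y)) = _
    rw [show ((death_index ps + 1).toNat) = (death_index ps).toNat + 1 from by omega, hs]
  unfold Spec_laatst_levende_positie laatst_levende_positie laatst_levende_positie_alt
  rw [hcore, hp, hB]
  simp
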